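-- pv_equiv track=rewrite | github.com/Soiiii/PythonTest | Test/test42.py | solution
-- ===== SOURCE A (Python) =====
-- def solution(price, money, count):
--     answer = -1
--     sum = 0
--     for i in range(count+1):
--         sum += (price * i)
--         if sum > money:
--             answer = sum-money
--         else:
--             answer = 0
--     return answer
-- ===== SOURCE B (Python) =====
-- def solution(price, money, count):
--     total = price * count * (count + 1) // 2
--     return total - money if total > money else 0
-- ===== Notes on version B (the rewrite author's own statement) =====
-- stated objective: faster
-- what changed: Replaces the O(count) accumulation loop by the closed-form triangular sum price*count*(count+1)//2 compared once against money.
-- outside the precondition, e.g. on solution(5, 10, -3): A returns -1, B returns 5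
import Mathlib
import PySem

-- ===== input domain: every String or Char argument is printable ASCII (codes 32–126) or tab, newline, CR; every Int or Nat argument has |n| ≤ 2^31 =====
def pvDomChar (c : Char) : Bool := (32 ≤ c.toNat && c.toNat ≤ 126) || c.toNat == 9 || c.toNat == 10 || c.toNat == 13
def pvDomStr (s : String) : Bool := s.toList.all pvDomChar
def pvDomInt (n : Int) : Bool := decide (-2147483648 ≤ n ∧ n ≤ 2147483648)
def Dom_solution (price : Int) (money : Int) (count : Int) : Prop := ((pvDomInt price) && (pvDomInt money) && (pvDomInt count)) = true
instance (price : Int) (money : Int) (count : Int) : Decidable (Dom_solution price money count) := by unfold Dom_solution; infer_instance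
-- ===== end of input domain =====

-- B replaces A's O(count) accumulation loop by the closed-form triangular sum
-- price*count*(count+1)//2 compared once against money (objective: faster, asymptotic).

-- ===== PORT A =====
def solution (price : Int) (money : Int) (count : Int) : Int :=
  -- answer = -1; sum = 0; for i in range(count+1): sum += price*i; answer = sum-money if sum>money else 0
  let st := (PySem.List.pyRange 0 (count + 1) 1).foldl
    (fun (st : Int × Int) i =>
      let s := st.2 + price * i
      if s > money then (s - money, s) else (0, s)) (-1, 0)
  st.1

-- ===== PORT B =====
def solution_alt (price : Int) (money : Int) (count : Int) : Int :=
  let total := PySem.Int.floordiv (price * count * (count + 1)) 2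
  if total > money then total - money else 0

-- ===== PRECONDITION & SPEC =====
-- Pre_ restricts to the natural domain count ≥ 0: for negative count A's loop body never
-- runs and A returns its leftover initializer -1, which is not an excess-cost value.
def Pre_solution (price : Int) (money : Int) (count : Int) : Prop := 0 ≤ count
instance (price : Int) (money : Int) (count : Int) : Decidable (Pre_solution price money count) := by unfold Pre_solution; infer_instance
def pvWitness_solution : Int × Int × Int := (2, 3, 3)

def Spec_solution (price : Int) (money : Int) (count : Int) (out : Int) : Prop := out = solution_alt price money count
instance (price : Int) (money : Int) (count : Int) (out : Int) : Decidable (Spec_solution price money count out) := by unfold Spec_solution; infer_instance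

-- ===== CLAIM (what is proved, stated in full; the proofs are below) =====
def Claim_equal_solution : Prop := ∀ (price : Int) (money : Int) (count : Int), Dom_solution price money count → Pre_solution price money count → Spec_solution price money count (solution price money count)

-- ===== LEMMAS AND PROOFS =====

/-- Triangular numbers, as an Int. -/
def pvTri : Nat → Int
  | 0 => 0
  | n + 1 => pvTri n + (n + 1)

theorem pvTri_two_mul (n : Nat) : 2 * pvTri n = (n : Int) * (n + 1) := by
  induction n with
  | zero => simp [pvTri]
  | succ n ih => simp only [pvTri]; push_cast; push_cast at ih; ring_nf; ring_nf at ih; omega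

/-- A's loop over range(n+1) ends with answer/sum determined by the triangular sum. -/
theorem pvFold_eq (price money : Int) (n : Nat) :
    ((PySem.List.pyRange 0 ((n : Int) + 1) 1).foldl
      (fun (st : Int × Int) i =>
        let s := st.2 + price * i
        if s > money then (s - money, s) else (0, s)) (-1, 0))
    = (if price * pvTri n > money then price * pvTri n - money else 0, price * pvTri n) := by
  induction n with
  | zero =>
    rw [show ((0 : Nat) : Int) + 1 = 0 + 1 by norm_num, PySem.List.pyRange_one_singleton]
    simp only [pvTri, List.foldl]
    norm_num
    split_ifs <;> simp
  | succ n ih =>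
    have h : ((n + 1 : Nat) : Int) + 1 = ((n : Int) + 1) + 1 := by push_cast; ring
    rw [h, PySem.List.pyRange_one_succ_right (by positivity), List.foldl_append, ih]
    have hs : price * pvTri n + price * ((n : Int) + 1) = price * pvTri (n + 1) := by
      simp only [pvTri]; push_cast; ring
    simp only [List.foldl, hs]
    split_ifs <;> simp

theorem pvFloordiv_tri (price : Int) (n : Nat) :
    PySem.Int.floordiv (price * (n : Int) * ((n : Int) + 1)) 2 = price * pvTri n := by
  have h : price * (n : Int) * ((n : Int) + 1) = 2 * (price * pvTri n) := by
    linear_combination (-price) * pvTri_two_mul n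
  rw [h]
  simp [PySem.Int.floordiv, Int.mul_fdiv_cancel_left _ (by norm_num : (2 : Int) ≠ 0)]

-- ===== VERDICT (by name: the statement is the Claim_ definition above) =====
theorem solution_spec : Claim_equal_solution := by
  intro price money count _ hpre
  obtain ⟨n, rfl⟩ := Int.eq_ofNat_of_zero_le hpre
  unfold Spec_solution solution solution_alt
  rw [pvFold_eq, pvFloordiv_tri]
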